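-- pv_equiv track=rewrite | github.com/jeremymcrae/clinical-filter | clinicalfilter/variant/info.py | get_genes_for_allele
-- ===== SOURCE A (Python) =====
-- def get_genes_for_allele(info, position):
--     """ gets list of gene symbols for an allele, prioritising HGNC symbols.
--
--     We have a variety of gene symbol sources for a variant. The INFO field
--     can contain HGNC, SYMBOL, ENSG, ENST, ENSP and ENSR. HGNC is HGNC gene
--     symbol, SYMBOL is VEGA-derived gene symbol, ENSG is Ensembl gene ID,
--     ENST is Ensembl transcript ID, ENSP is Ensembl protein ID, and ENSR is
--     Ensembl regulatory ID.
--
--     In order for variants to check for compound heterozygotes, we match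
--     variants by gene symbols. Ideally each variant would have a list of HGNC
--     symbols that it occurs in, but this is not the case. Many variants have
--     HGNC entries such as ".|GENE1|GENE2|.", where the "." indicates no
--     symbol available. We fill in the missing symbols by successively looking
--     through the SYMBOL field (from VEGA-derived symbols), then the ENSG IDs
--     and so on. Some entries will always lack a value, such as for variants
--     in transcription factor binding sites, where no symbol will ever be
--     available for the entry.
--
--     Args:
--         position: integer position for the allele to be examined within a
--             comma-separated list.
--
--     Returns:
--         list of gene symbols, filled in from the HGNC, SYMBOL, ENSG fields
--         where available.
--     """
--
--     # set the list of fields to check, in order of their priority.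
--     fields = ["HGNC", "SYMBOL", "ENSG", "ENST", "ENSP", "ENSR"]
--     fields = [ x for x in fields if x in info ]
--
--     genes = None
--     for field in fields:
--         symbols = info[field].split(",")[position].split("|")
--         if genes is None:
--             genes = symbols
--
--         # find which positions of the gene list are missing a symbol
--         blanks = [ x for x,item in enumerate(genes) if item in ["", "."] ]
--
--         # for the missing symbol positions, if the current list of symbols
--         # contains a value, swap that value into the gene list.
--         for x in blanks:
--             try:
--                 if symbols[x] != "":
--                     genes[x] = symbols[x]
--             except IndexError as error:
--                 # very occasionally we get a variant that raises this error.
--                 # The one example I've seen had ENSR=,.|ENSR00000215586.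
--                 # This is first split by ',' (giving ['', '.|ENSR00000215586']),
--                 # then an entry is selected and split by '|'. The issue is
--                 # that only the seond entry contains '|', so the lengths are
--                 # discrepant
--                 continue
--
--     if genes is not None:
--         genes = [ x if x not in ["", "."] else None for x in genes ]
--
--     return genes
-- ===== SOURCE B (Python) =====
-- def _pick(columns, i):
--     # first column that has a real symbol (not '' and not '.') at index i
--     for col in columns:
--         if i < len(col) and col[i] not in ("", "."):
--             return col[i]
--     return None
--
-- def get_genes_for_allele(info, position):
--     fields = [f for f in ("HGNC", "SYMBOL", "ENSG", "ENST", "ENSP", "ENSR") if f in info]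
--     columns = [info[f].split(",")[position].split("|") for f in fields]
--     if not columns:
--         return None
--     return [_pick(columns, i) for i in range(len(columns[0]))]
-- ===== Notes on version B (the rewrite author's own statement) =====
-- stated objective: simpler
-- what changed: B transposes A's loops: instead of mutating a genes list per field (recomputing blank positions and swapping values in), it collects each present field's '|'-split column once and then, per index, returns the first column entry that is a real symbol (not '' or '.').
import Mathlib
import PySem

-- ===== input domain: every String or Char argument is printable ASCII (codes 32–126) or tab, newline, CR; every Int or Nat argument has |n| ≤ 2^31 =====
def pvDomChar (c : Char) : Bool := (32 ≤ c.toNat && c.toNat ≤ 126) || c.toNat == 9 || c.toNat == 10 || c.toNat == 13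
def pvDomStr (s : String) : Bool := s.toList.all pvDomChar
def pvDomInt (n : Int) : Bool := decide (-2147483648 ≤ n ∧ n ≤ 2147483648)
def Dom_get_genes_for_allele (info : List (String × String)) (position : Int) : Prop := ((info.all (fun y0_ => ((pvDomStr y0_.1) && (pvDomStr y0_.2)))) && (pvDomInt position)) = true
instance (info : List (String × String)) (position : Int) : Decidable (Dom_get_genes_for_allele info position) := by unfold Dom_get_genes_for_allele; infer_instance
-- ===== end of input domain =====

-- B replaces A's stateful genes-list mutation (recomputing blanks and swapping per field) by a
-- column-transposed pass: per index, pick the first field whose entry is a real symbol (objective: simpler).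

-- ===== PORT A =====
-- fields checked, in priority order
def pvFields : List String := ["HGNC", "SYMBOL", "ENSG", "ENST", "ENSP", "ENSR"]

-- s.split(sep) for a non-empty sep (exact: PySem.Chars.splitOn is Python's str.split)
def pvSplit (s : String) (sep : String) : List String :=
  (PySem.Chars.splitOn s.toList sep.toList).map String.ofList

-- info[field].split(",")[position].split("|")  (none = KeyError/IndexError)
def pvSyms (info : List (String × String)) (position : Int) (field : String) : Option (List String) :=
  match (PySem.Dict.mk info).get? field with
  | none => none
  | some v =>
    match PySem.List.pyGet? (pvSplit v ",") position with
    | none => none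
    | some entry => some (pvSplit entry "|")

-- the body of 'for x in blanks: try: if symbols[x] != "": genes[x] = symbols[x] except IndexError: continue'
def aSwap (symbols : List String) (g : List String) (x : Int) : List String :=
  match PySem.List.pyGet? symbols x with
  | none => g                                  -- IndexError caught: continue
  | some s => if s == "" then g else g.set x.toNat s

-- one iteration of A's 'for field in fields' body, after 'genes' is known non-None
def aStep (symbols : List String) (genes : List String) : List String :=
  let blanks := ((PySem.List.enumerate genes).filter (fun p => p.2 == "" || p.2 == ".")).map (fun p => p.1)
  blanks.foldl (aSwap symbols) genes

-- the whole 'for field in fields' loop; outer none = uncaught IndexError, inner = 'genes is None'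
def aLoop (info : List (String × String)) (position : Int) :
    List String → Option (List String) → Option (Option (List String))
  | [], genes => some genes
  | field :: rest, genes =>
    match pvSyms info position field with
    | none => none
    | some symbols =>
      let genes' := genes.getD symbols
      aLoop info position rest (some (aStep symbols genes'))

def get_genes_for_allele (info : List (String × String)) (position : Int) : Option (List (Option String)) :=
  let fields := pvFields.filter (fun x => (PySem.Dict.mk info).contains x)
  match aLoop info position fields none with
  | none => none
  | some none => none
  | some (some genes) =>
      some (genes.map (fun x => if x == "" || x == "." then none else some x))

-- ===== PORT B =====
-- _pick(columns, i): first column with a real symbol at index i (early return → recursion)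
def bPick (columns : List (List String)) (i : Nat) : Option String :=
  match columns with
  | [] => none
  | col :: rest =>
    match col[i]? with
    | some s => if s == "" || s == "." then bPick rest i else some s
    | none => bPick rest i

-- [info[f].split(",")[position].split("|") for f in fields]  (none = raised)
def bColumns (info : List (String × String)) (position : Int) : List String → Option (List (List String))
  | [] => some []
  | f :: rest =>
    match pvSyms info position f with
    | none => none
    | some col =>
      match bColumns info position rest with
      | none => none
      | some cols => some (col :: cols)

def get_genes_for_allele_alt (info : List (String × String)) (position : Int) : Option (List (Option String)) :=
  let fields := pvFields.filter (fun x => (PySem.Dict.mk info).contains x)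
  match bColumns info position fields with
  | none => none
  | some [] => none
  | some (c0 :: cs) => some ((List.range c0.length).map (fun i => bPick (c0 :: cs) i))

-- ===== PRECONDITION & SPEC =====
-- Pre_ excludes exactly the inputs where A raises: an uncaught IndexError when 'position' is out of
-- range for the comma-split of some present field's value (the comma-split indexing is not inside A's try/except).
def Pre_get_genes_for_allele (info : List (String × String)) (position : Int) : Prop :=
  ∀ f ∈ pvFields, ((PySem.Dict.mk info).get? f).all
    (fun v => (PySem.List.pyGet? (pvSplit v ",") position).isSome) = true
instance (info : List (String × String)) (position : Int) : Decidable (Pre_get_genes_for_allele info position) := by unfold Pre_get_genes_for_allele; infer_instance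

def pvWitness_get_genes_for_allele : (List (String × String)) × Int :=
  ([("HGNC", ".|GENE1"), ("ENSG", "E1|E2")], 0)

def Spec_get_genes_for_allele (info : List (String × String)) (position : Int) (out : Option (List (Option String))) : Prop := out = get_genes_for_allele_alt info position
instance (info : List (String × String)) (position : Int) (out : Option (List (Option String))) : Decidable (Spec_get_genes_for_allele info position out) := by unfold Spec_get_genes_for_allele; infer_instance

-- ===== CLAIM (what is proved, stated in full; the proofs are below) =====
def Claim_equal_get_genes_for_allele : Prop := ∀ (info : List (String × String)) (position : Int), Dom_get_genes_for_allele info position → Pre_get_genes_for_allele info position → Spec_get_genes_for_allele info position (get_genes_for_allele info position)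

-- ===== LEMMAS AND PROOFS =====

-- 'blank': the value A's final comprehension maps to None, and what counts as a missing symbol
def pvBlank (s : String) : Bool := s == "" || s == "."

-- what one aStep does to position i of genes
def pvStep1 (gv : String) (col : List String) (i : Nat) : String :=
  if pvBlank gv then
    match col[i]? with
    | some s => if s == "" then gv else s
    | none => gv
  else gv

-- the value at position i after processing a list of columns
def pvChain (gv : String) (cols : List (List String)) (i : Nat) : String :=
  match cols with
  | [] => gv
  | col :: cs => pvChain (pvStep1 gv col i) cs i

-- A's loop as a plain fold over the columns
def pvProc (cols : List (List String)) (g : List String) : List String :=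
  cols.foldl (fun g col => aStep col g) g

-- the list of blank positions A recomputes each iteration
def pvBlanksOf (g : List String) : List Int :=
  ((PySem.List.enumerate g).filter (fun p => p.2 == "" || p.2 == ".")).map (fun p => p.1)

theorem aSwap_length (symbols g : List String) (x : Int) : (aSwap symbols g x).length = g.length := by
  unfold aSwap; cases PySem.List.pyGet? symbols x
  · rfl
  · simp only
    split
    · rfl
    · simp

theorem aStep_length (symbols g : List String) : (aStep symbols g).length = g.length := by
  unfold aStep
  generalize ((PySem.List.enumerate g _).filter _).map _ = L
  induction L generalizing g with
  | nil => rfl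
  | cons x L ih => simpa [List.foldl_cons, aSwap_length] using ih (aSwap symbols g x)

theorem pvProc_length (cols : List (List String)) (g : List String) : (pvProc cols g).length = g.length := by
  induction cols generalizing g with
  | nil => rfl
  | cons col cs ih => simpa [pvProc, List.foldl_cons, aStep_length] using ih (aStep col g)

theorem aSwap_get_ne (symbols g : List String) (x : Int) (i : Nat)
    (hx : 0 ≤ x) (hne : (i : Int) ≠ x) :
    (aSwap symbols g x)[i]? = g[i]? := by
  unfold aSwap
  cases hs : PySem.List.pyGet? symbols x with
  | none => rfl
  | some s =>
    simp only
    split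
    · rfl
    · exact List.getElem?_set_ne (by omega)

theorem aSwap_get_self (symbols g : List String) (i : Nat) (hi : i < g.length) :
    (aSwap symbols g (i : Int))[i]? =
      some (match symbols[i]? with | some s => if s == "" then g[i] else s | none => g[i]) := by
  unfold aSwap
  have hpg : PySem.List.pyGet? symbols (i : Int) = symbols[i]? := by simp [pysem]
  rw [hpg]
  cases hs : (symbols[i]?) with
  | none => simp [List.getElem?_eq_getElem hi]
  | some s =>
    simp only
    by_cases he : s == ""
    · simp [he, List.getElem?_eq_getElem hi]
    · simp [he, Int.toNat_natCast, hi]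

theorem mem_pvBlanksOf (g : List String) (x : Int) :
    x ∈ pvBlanksOf g ↔ ∃ (k : Nat) (h : k < g.length), x = (k : Int) ∧ pvBlank g[k] = true := by
  unfold pvBlanksOf
  simp only [List.mem_map, List.mem_filter]
  constructor
  · rintro ⟨p, ⟨hp, hb⟩, rfl⟩
    rw [PySem.List.mem_enumerate_iff] at hp
    obtain ⟨k, hk, rfl⟩ := hp
    exact ⟨k, hk, by simp, by simpa [pvBlank] using hb⟩
  · rintro ⟨k, hk, rfl, hb⟩
    refine ⟨((0 : Int) + (k : Int), g[k]), ⟨?_, by simpa [pvBlank] using hb⟩, by simp⟩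
    rw [PySem.List.mem_enumerate_iff]
    exact ⟨k, hk, rfl⟩

theorem pvBlanksOf_sorted (g : List String) : (pvBlanksOf g).Pairwise (· < ·) := by
  unfold pvBlanksOf
  exact List.Pairwise.map _ (fun a b hab => hab)
    (List.Pairwise.filter _ (PySem.List.pairwise_lt_enumerate g 0))

theorem foldl_aSwap_notmem (symbols : List String) (L : List Int) (g : List String) (i : Nat)
    (hL : ∀ x ∈ L, 0 ≤ x) (hn : (i : Int) ∉ L) :
    (L.foldl (aSwap symbols) g)[i]? = g[i]? := by
  induction L generalizing g with
  | nil => rfl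
  | cons x L ih =>
    rw [List.foldl_cons,
      ih (aSwap symbols g x) (fun y hy => hL y (by simp [hy])) (fun h => hn (by simp [h]))]
    exact aSwap_get_ne symbols g x i (hL x (by simp)) (fun h => hn (by simp [h]))

theorem foldl_aSwap_mem (symbols : List String) (L : List Int) (g : List String) (i : Nat)
    (hs : L.Pairwise (· < ·)) (hL : ∀ x ∈ L, 0 ≤ x) (hm : (i : Int) ∈ L) (hi : i < g.length) :
    (L.foldl (aSwap symbols) g)[i]? = (aSwap symbols g (i : Int))[i]? := by
  induction L generalizing g with
  | nil => simp at hm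
  | cons x L ih =>
    rw [List.pairwise_cons] at hs
    rw [List.foldl_cons]
    rcases List.mem_cons.mp hm with heq | hmem
    · subst heq
      rw [foldl_aSwap_notmem symbols L _ i (fun y hy => hL y (by simp [hy]))]
      intro hmem
      exact absurd (hs.1 _ hmem) (by omega)
    · have hne : (i : Int) ≠ x := by
        intro h; rw [← h] at hs
        exact absurd (hs.1 _ hmem) (by omega)
      have hi' : i < (aSwap symbols g x).length := by rw [aSwap_length]; exact hi
      rw [ih (aSwap symbols g x) hs.2 (fun y hy => hL y (by simp [hy])) hmem hi']
      -- aSwap at index i depends only on g[i] and symbols, and x ≠ i leaves g[i] unchanged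
      have hgi : (aSwap symbols g x)[i]? = g[i]? :=
        aSwap_get_ne symbols g x i (hL x (by simp)) hne
      rw [aSwap_get_self symbols (aSwap symbols g x) i hi', aSwap_get_self symbols g i hi]
      have hv : (aSwap symbols g x)[i] = g[i] := by
        rw [List.getElem?_eq_getElem hi', List.getElem?_eq_getElem hi] at hgi
        exact Option.some.inj hgi
      rw [hv]

theorem aStep_get (symbols g : List String) (i : Nat) (hi : i < g.length) :
    (aStep symbols g)[i]? = some (pvStep1 g[i] symbols i) := by
  have hstep : aStep symbols g = (pvBlanksOf g).foldl (aSwap symbols) g := rfl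
  rw [hstep]
  have hnn : ∀ x ∈ pvBlanksOf g, 0 ≤ x := by
    intro x hx
    obtain ⟨k, hk, rfl, _⟩ := (mem_pvBlanksOf g x).mp hx
    positivity
  by_cases hb : pvBlank g[i] = true
  · have hm : (i : Int) ∈ pvBlanksOf g := (mem_pvBlanksOf g _).mpr ⟨i, hi, rfl, hb⟩
    rw [foldl_aSwap_mem symbols _ g i (pvBlanksOf_sorted g) hnn hm hi,
        aSwap_get_self symbols g i hi]
    unfold pvStep1
    rw [if_pos hb]
  · have hm : (i : Int) ∉ pvBlanksOf g := by
      intro h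
      obtain ⟨k, hk, hkk, hbk⟩ := (mem_pvBlanksOf g _).mp h
      have : k = i := by omega
      subst this; exact hb hbk
    rw [foldl_aSwap_notmem symbols _ g i hnn hm, List.getElem?_eq_getElem hi]
    unfold pvStep1
    rw [if_neg (by simp [hb])]

theorem pvProc_get (cols : List (List String)) (g : List String) (i : Nat) (hi : i < g.length) :
    (pvProc cols g)[i]? = some (pvChain g[i] cols i) := by
  induction cols generalizing g with
  | nil => simp [pvProc, pvChain, hi]
  | cons col cs ih =>
    have hi' : i < (aStep col g).length := by rw [aStep_length]; exact hi
    have h1 := aStep_get col g i hi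
    have h2 := ih (aStep col g) hi'
    have hv : (aStep col g)[i] = pvStep1 g[i] col i := by
      have := List.getElem?_eq_getElem hi'
      rw [this] at h1; exact Option.some.inj h1
    simpa [pvProc, List.foldl_cons, pvChain, hv] using h2

-- the key correspondence: A's chained value vs B's first-real-symbol pick
theorem chain_vs_pick (cols : List (List String)) (gv : String) (i : Nat) :
    (if pvBlank gv then bPick cols i else some gv) =
      (if pvBlank (pvChain gv cols i) then none else some (pvChain gv cols i)) := by
  induction cols generalizing gv with
  | nil =>
    by_cases h : pvBlank gv = true <;> simp [pvChain, bPick, h]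
  | cons col cs ih =>
    have hch : pvChain gv (col :: cs) i = pvChain (pvStep1 gv col i) cs i := rfl
    by_cases h : pvBlank gv = true
    · rw [if_pos h, hch]
      cases hc : col[i]? with
      | none =>
        have h1 : pvStep1 gv col i = gv := by simp [pvStep1, h, hc]
        have := ih gv
        rw [if_pos h] at this
        rw [h1]
        simpa [bPick, hc] using this
      | some s =>
        by_cases hs : s == ""
        · have h1 : pvStep1 gv col i = gv := by simp [pvStep1, h, hc, hs]
          have hb2 : (s == "" || s == ".") = true := by simp_all
          have := ih gv
          rw [if_pos h] at this
          rw [h1]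
          simpa [bPick, hc, hb2] using this
        · have h1 : pvStep1 gv col i = s := by simp [pvStep1, h, hc, hs]
          rw [h1]
          by_cases hbs : pvBlank s = true
          · have := ih s
            rw [if_pos hbs] at this
            have hb2 : (s == "" || s == ".") = true := by simpa [pvBlank] using hbs
            simpa [bPick, hc, hb2] using this
          · have := ih s
            rw [if_neg hbs] at this
            have hb2 : (s == "" || s == ".") = false := by simpa [pvBlank] using hbs
            rw [← this]
            simp [bPick, hc, hb2]
    · have h1 : pvStep1 gv col i = gv := by simp [pvStep1, h]
      rw [if_neg h, hch, h1]
      have := ih gv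
      rw [if_neg h] at this
      exact this

-- under Pre_, aLoop is pvProc over the columns bColumns collects
theorem bColumns_eq (info : List (String × String)) (position : Int) (fs : List String)
    (h : ∀ f ∈ fs, (pvSyms info position f).isSome) :
    bColumns info position fs = some (fs.map (fun f => (pvSyms info position f).getD [])) := by
  induction fs with
  | nil => rfl
  | cons f rest ih =>
    have hf := h f (by simp)
    cases hs : pvSyms info position f with
    | none => rw [hs] at hf; simp at hf
    | some col =>
      have := ih (fun x hx => h x (by simp [hx]))
      simp [bColumns, hs, this]

theorem aLoop_eq (info : List (String × String)) (position : Int) (fs : List String) (g : List String)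
    (h : ∀ f ∈ fs, (pvSyms info position f).isSome) :
    aLoop info position fs (some g) =
      some (some (pvProc (fs.map (fun f => (pvSyms info position f).getD [])) g)) := by
  induction fs generalizing g with
  | nil => rfl
  | cons f rest ih =>
    have hf := h f (by simp)
    cases hs : pvSyms info position f with
    | none => rw [hs] at hf; simp at hf
    | some col =>
      have := ih (aStep col g) (fun x hx => h x (by simp [hx]))
      simp [aLoop, hs, pvProc, this]

theorem pre_syms (info : List (String × String)) (position : Int)
    (hpre : Pre_get_genes_for_allele info position) :
    ∀ f ∈ pvFields.filter (fun x => (PySem.Dict.mk info).contains x),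
      (pvSyms info position f).isSome := by
  intro f hf
  rw [List.mem_filter] at hf
  obtain ⟨hmem, hcont⟩ := hf
  have hp := hpre f hmem
  cases hg : (PySem.Dict.mk info).get? f with
  | none =>
    exfalso
    rw [PySem.Dict.contains_eq_isSome_get?, hg] at hcont
    simp at hcont
  | some v =>
    rw [hg] at hp
    simp at hp
    obtain ⟨entry, hi⟩ := Option.isSome_iff_exists.mp hp
    simp [pvSyms, hg, hi]

-- ===== VERDICT (by name: the statement is the Claim_ definition above) =====
theorem get_genes_for_allele_spec : Claim_equal_get_genes_for_allele := by
  intro info position _ hpre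
  unfold Spec_get_genes_for_allele get_genes_for_allele get_genes_for_allele_alt
  have hall := pre_syms info position hpre
  cases hfs : pvFields.filter (fun x => (PySem.Dict.mk info).contains x) with
  | nil => rfl
  | cons f0 rest =>
    rw [hfs] at hall
    show (match aLoop info position (f0 :: rest) none with
      | none => none
      | some none => none
      | some (some genes) => some (genes.map (fun x => if (x == "" || x == ".") = true then none else some x))) =
      (match bColumns info position (f0 :: rest) with
      | none => none
      | some [] => none
      | some (c0 :: cs) => some ((List.range c0.length).map (fun i => bPick (c0 :: cs) i)))
    rw [bColumns_eq info position _ hall]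
    have hf0 := hall f0 (by simp)
    cases hs0 : pvSyms info position f0 with
    | none => rw [hs0] at hf0; simp at hf0
    | some c0 =>
      have hrest : ∀ f ∈ rest, (pvSyms info position f).isSome :=
        fun x hx => hall x (by simp [hx])
      have hloop := aLoop_eq info position rest (aStep c0 c0) hrest
      simp only [aLoop, hs0, Option.getD_none, Option.getD_some, List.map_cons]
      rw [hloop]
      simp only []
      set cols : List (List String) := c0 :: rest.map (fun f => (pvSyms info position f).getD []) with hcols
      have hG : pvProc (rest.map (fun f => (pvSyms info position f).getD [])) (aStep c0 c0) = pvProc cols c0 := by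
        simp [pvProc, hcols, List.foldl_cons]
      rw [hG]
      congr 1
      apply List.ext_getElem?
      intro i
      by_cases hi : i < c0.length
      · have hgi : (pvProc cols c0)[i]? = some (pvChain c0[i] cols i) := pvProc_get cols c0 i hi
        have hA : ((pvProc cols c0).map (fun x => if x == "" || x == "." then none else some x))[i]? =
            some (if pvBlank (pvChain c0[i] cols i) then none else some (pvChain c0[i] cols i)) := by
          rw [List.getElem?_map, hgi]
          simp [pvBlank]
        rw [hA, List.getElem?_map, List.getElem?_range hi]
        have hkey := chain_vs_pick cols c0[i] i
        by_cases hb : pvBlank c0[i] = true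
        · rw [if_pos hb] at hkey
          rw [← hkey]
          rfl
        · rw [if_neg hb] at hkey
          rw [← hkey]
          have hpick : bPick cols i = some c0[i] := by
            have hb2 : (c0[i] == "" || c0[i] == ".") = false := by
              simpa [pvBlank] using hb
            simp [hcols, bPick, List.getElem?_eq_getElem hi, hb2]
          simp [hpick]
      · have h1 : i ≥ ((pvProc cols c0).map (fun x => if x == "" || x == "." then none else some x)).length := by
          rw [List.length_map, pvProc_length]; omega
        have h2 : i ≥ ((List.range c0.length).map (fun i => bPick cols i)).length := by
          rw [List.length_map, List.length_range]; omega
        rw [List.getElem?_eq_none h1, List.getElem?_eq_none h2]
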